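-- pv_equiv track=rewrite | github.com/dayepao/backup | py/rename_media.py | get_left_same_part
-- ===== SOURCE A (Python) =====
-- def get_left_same_part(file_list):
--     # 判断文件数量是否为1
--     if len(file_list) == 1:
--         return ""
--
--     left_same_part = ""
--     i = 0
--     flag = True
--     for i in range(len(file_list[0])):
--         left_same_part += file_list[0][i]
--         for file in file_list:
--             if left_same_part != file[:i+1]:
--                 left_same_part = left_same_part[:-1]
--                 flag = False
--             if not flag:
--                 break
--         i += 1
--         if not flag:
--             break
--
--     # 判断最后一个字符是否为数字
--     if left_same_part and left_same_part[-1].isdigit():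
--         left_same_part = left_same_part[:-1]
--
--     return left_same_part
-- ===== SOURCE B (Python) =====
-- def get_left_same_part(file_list):
--     if len(file_list) == 1:
--         return ""
--     files = sorted(file_list)
--     first, last = files[0], files[-1]
--     prefix = ""
--     for a, b in zip(first, last):
--         if a != b:
--             break
--         prefix += a
--     if prefix and prefix[-1].isdigit():
--         prefix = prefix[:-1]
--     return prefix
-- ===== Notes on version B (the rewrite author's own statement) =====
-- stated objective: alternative
-- what changed: Instead of scanning every file at every character position, B sorts the list once and computes the common prefix of only the two lexicographic extremes (files[0] and files[-1]) with a single zip walk, then applies the same trailing-digit trim.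
-- outside the precondition, e.g. on get_left_same_part([]): A raises IndexError, B raises IndexError
import Mathlib
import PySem

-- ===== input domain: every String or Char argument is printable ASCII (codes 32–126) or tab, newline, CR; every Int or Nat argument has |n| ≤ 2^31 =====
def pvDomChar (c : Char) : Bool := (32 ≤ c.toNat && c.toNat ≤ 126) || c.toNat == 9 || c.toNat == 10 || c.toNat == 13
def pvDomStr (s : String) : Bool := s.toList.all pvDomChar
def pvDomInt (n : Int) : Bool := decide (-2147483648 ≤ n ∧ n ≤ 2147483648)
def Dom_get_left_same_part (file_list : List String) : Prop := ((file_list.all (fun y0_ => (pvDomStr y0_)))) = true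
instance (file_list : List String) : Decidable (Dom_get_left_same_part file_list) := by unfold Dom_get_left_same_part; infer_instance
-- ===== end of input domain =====

-- B replaces A's per-position scan of every file by sort-then-compare of the two lexicographic
-- extremes (objective: alternative; same trailing-digit trim; equivalence of the return value).

-- ===== PORT A =====
-- outer 'for i in range(len(file_list[0]))' with its break, carried state: left_same_part (acc);
-- the inner for-loop (break at first mismatching file) is the short-circuiting List.all.
def aLoopA (files : List String) (i : Nat) (rest : List Char) (acc : List Char) : List Char :=
  match rest with
  | [] => acc
  | c :: rest' =>
    let acc' := acc ++ [c]                                   -- left_same_part += file_list[0][i]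
    -- file[:i+1] != left_same_part  → trim back and break out of both loops
    if files.all (fun f => PySem.List.slice f.toList none (some ((i : Int) + 1)) == acc') then
      aLoopA files (i + 1) rest' acc'
    else
      acc

def get_left_same_part (file_list : List String) : String :=
  if file_list.length == 1 then "" else
  -- file_list[0]; IndexError on [] is excluded by Pre_
  let s0 := PySem.List.pyGetD file_list 0 ""
  let lsp := aLoopA file_list 0 s0.toList []
  -- 'if left_same_part and left_same_part[-1].isdigit()': Char.isDigit is exact on ASCII; [:-1] = dropLast
  if lsp ≠ [] ∧ (lsp.getLastD ' ').isDigit then String.ofList lsp.dropLast else String.ofList lsp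

-- ===== PORT B =====
-- the zip walk of Source B: compare characterwise, stop at the first mismatch
def lcp2 : List Char → List Char → List Char
  | a :: as, b :: bs => if a = b then a :: lcp2 as bs else []
  | _, _ => []

def get_left_same_part_alt (file_list : List String) : String :=
  if file_list.length == 1 then "" else
  let files := PySem.List.sorted file_list (fun s => s) false
  let first := PySem.List.pyGetD files 0 ""                  -- files[0]; IndexError on [] excluded by Pre_
  let last := PySem.List.pyGetD files (-1) ""                -- files[-1]
  let pfx := lcp2 first.toList last.toList
  if pfx ≠ [] ∧ (pfx.getLastD ' ').isDigit then String.ofList pfx.dropLast else String.ofList pfx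

-- ===== PRECONDITION & SPEC =====
-- Pre_ excludes only the empty list, on which the Python A raises IndexError (file_list[0]).
def Pre_get_left_same_part (file_list : List String) : Prop := file_list ≠ []
instance (file_list : List String) : Decidable (Pre_get_left_same_part file_list) := by unfold Pre_get_left_same_part; infer_instance
def pvWitness_get_left_same_part : List String := ["ab1", "ab2"]

def Spec_get_left_same_part (file_list : List String) (out : String) : Prop := out = get_left_same_part_alt file_list
instance (file_list : List String) (out : String) : Decidable (Spec_get_left_same_part file_list out) := by unfold Spec_get_left_same_part; infer_instance

-- ===== CLAIM =====
def Claim_equal_get_left_same_part : Prop := ∀ (file_list : List String), Dom_get_left_same_part file_list → Pre_get_left_same_part file_list → Spec_get_left_same_part file_list (get_left_same_part file_list)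

-- ===== LEMMAS AND PROOFS =====

lemma lcp2_prefix_left : ∀ a b : List Char, lcp2 a b <+: a := by
  intro a
  induction a with
  | nil => intro b; cases b <;> simp [lcp2]
  | cons c as ih =>
    intro b
    cases b with
    | nil => simp [lcp2]
    | cons d bs =>
      by_cases h : c = d <;> simp [lcp2, h]
      exact ih bs

lemma lcp2_prefix_right : ∀ a b : List Char, lcp2 a b <+: b := by
  intro a
  induction a with
  | nil => intro b; cases b <;> simp [lcp2]
  | cons c as ih =>
    intro b
    cases b with
    | nil => simp [lcp2]
    | cons d bs =>
      by_cases h : c = d <;> simp [lcp2, h]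
      subst h; exact ih bs

lemma lcp2_maximal : ∀ (p a b : List Char), p <+: a → p <+: b → p <+: lcp2 a b := by
  intro p
  induction p with
  | nil => intro a b _ _; exact List.nil_prefix
  | cons c p' ih =>
    intro a b ha hb
    rcases ha with ⟨t, rfl⟩
    rcases hb with ⟨u, hu⟩
    cases b with
    | nil => simp at hu
    | cons d bs =>
      rw [List.cons_append] at hu
      injection hu with h1 h2
      subst h1
      simp only [List.cons_append, lcp2]
      exact (List.cons_prefix_cons).2 ⟨rfl, ih _ _ ⟨t, rfl⟩ ⟨u, h2⟩⟩

-- lexicographic order on char lists: analysing a ≤ on cons cells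
lemma cons_le_cons_elim {a b : List Char} {c d : Char} (h : (c :: a) ≤ (d :: b)) :
    c < d ∨ (c = d ∧ a ≤ b) := by
  rcases lt_or_eq_of_le h with h | h
  · rcases List.cons_lt_cons_iff.1 h with h | ⟨he, h⟩
    · exact Or.inl h
    · exact Or.inr ⟨he, le_of_lt h⟩
  · injection h with h1 h2; exact Or.inr ⟨h1, le_of_eq h2⟩

-- a common prefix of two lexicographic bounds is a prefix of everything between them
lemma between_prefix : ∀ (p a x b : List Char), a ≤ x → x ≤ b → p <+: a → p <+: b → p <+: x := by
  intro p
  induction p with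
  | nil => intro _ _ _ _ _ _ _; exact List.nil_prefix
  | cons c p' ih =>
    intro a x b hax hxb hpa hpb
    rcases hpa with ⟨t, rfl⟩
    rcases hpb with ⟨u, hu⟩
    cases x with
    | nil => exact absurd hax (by simp)
    | cons d x' =>
      subst hu
      simp only [List.cons_append] at hax hxb
      rcases cons_le_cons_elim hax with h1 | ⟨h1, h1'⟩
      · rcases cons_le_cons_elim hxb with h2 | ⟨h2, _⟩
        · exact absurd (h1.trans h2) (lt_irrefl c)
        · exact absurd (h2 ▸ h1) (lt_irrefl c)
      · subst h1
        rcases cons_le_cons_elim hxb with h2 | ⟨_, h2'⟩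
        · exact absurd h2 (lt_irrefl c)
        · exact (List.cons_prefix_cons).2 ⟨rfl, ih _ _ _ h1' h2' ⟨t, rfl⟩ ⟨u, rfl⟩⟩

lemma pairwise_le_getLast : ∀ (l : List String) (k : String), l.Pairwise (· ≤ ·) → k ∈ l →
    ∀ (h : l ≠ []), k ≤ l.getLast h := by
  intro l
  induction l with
  | nil => intro k _ hk; simp at hk
  | cons x t ih =>
    intro k hp hk h
    cases t with
    | nil => simp at hk; simp [hk, List.getLast]
    | cons y u =>
      rw [List.getLast_cons (by simp)]
      rcases List.mem_cons.1 hk with rfl | hk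
      · exact List.rel_of_pairwise_cons hp (List.getLast_mem (by simp))
      · exact ih k hp.of_cons hk (by simp)

-- take (i+1) = the python slice in aLoopA's test
lemma slice_take (f : List Char) (i : Nat) :
    PySem.List.slice f none (some ((i : Int) + 1)) = f.take (i + 1) := by
  have h : ((i : Int) + 1) = ((i + 1 : Nat) : Int) := by push_cast; ring
  rw [h, PySem.List.slice_to_natCast]

-- the loop of A computes a maximal common prefix of all files drawn from acc ++ rest
lemma aLoopA_props (files : List String) : ∀ (rest : List Char) (i : Nat) (acc : List Char),
    acc.length = i → (∀ f ∈ files, acc <+: f.toList) →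
    (∀ f ∈ files, aLoopA files i rest acc <+: f.toList) ∧
    aLoopA files i rest acc <+: acc ++ rest ∧
    (∀ p : List Char, p <+: acc ++ rest → (∀ f ∈ files, p <+: f.toList) → p <+: aLoopA files i rest acc) := by
  intro rest
  induction rest with
  | nil =>
    intro i acc _ hcomm
    refine ⟨by simpa [aLoopA] using hcomm, by simp [aLoopA], ?_⟩
    intro p hp _
    simpa [aLoopA] using hp
  | cons c rest' ih =>
    intro i acc hlen hcomm
    by_cases hall : files.all (fun f => PySem.List.slice f.toList none (some ((i : Int) + 1)) == (acc ++ [c])) = true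
    · -- every file passes the check: recurse with acc' = acc ++ [c]
      have htake : ∀ f ∈ files, f.toList.take (i + 1) = acc ++ [c] := by
        intro f hf
        have := (List.all_eq_true.1 hall) f hf
        rw [slice_take] at this
        exact eq_of_beq this
      have hcomm' : ∀ f ∈ files, (acc ++ [c]) <+: f.toList := by
        intro f hf
        exact (htake f hf) ▸ List.take_prefix _ _
      have hlen' : (acc ++ [c]).length = i + 1 := by simp [hlen]
      obtain ⟨r1, r2, r3⟩ := ih (i + 1) (acc ++ [c]) hlen' hcomm'
      have hres : aLoopA files i (c :: rest') acc = aLoopA files (i + 1) rest' (acc ++ [c]) := by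
        simp only [aLoopA, hall, if_true]
      have happ : (acc ++ [c]) ++ rest' = acc ++ c :: rest' := by simp
      rw [hres]
      exact ⟨r1, happ ▸ r2, fun p hp hc => r3 p (happ ▸ hp) hc⟩
    · -- some file fails: loop breaks, returns acc
      have hres : aLoopA files i (c :: rest') acc = acc := by
        simp only [aLoopA]
        rw [if_neg hall]
      rw [hres]
      refine ⟨hcomm, List.prefix_append _ _, ?_⟩
      intro p hp hc
      obtain ⟨f, hf, hfne⟩ : ∃ f ∈ files, ¬ (PySem.List.slice f.toList none (some ((i : Int) + 1)) == (acc ++ [c])) = true := by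
        by_contra hcon
        simp only [not_exists, not_and, not_not] at hcon
        exact hall (List.all_eq_true.2 hcon)
      have hfne' : f.toList.take (i + 1) ≠ acc ++ [c] := by
        rw [slice_take] at hfne
        intro he; exact hfne (beq_iff_eq.2 he)
      rcases List.prefix_or_prefix_of_prefix hp (List.prefix_append acc (c :: rest')) with h1 | h1
      · exact h1
      · -- acc <+: p: either p = acc, or p extends acc' and contradicts the failing file
        by_cases hpl : p.length ≤ acc.length
        · exact (h1.eq_of_length (le_antisymm h1.length_le hpl)) ▸ List.prefix_refl _
        · exfalso
          have hacc' : (acc ++ [c]) <+: acc ++ c :: rest' := ⟨rest', by simp⟩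
          have h2 : (acc ++ [c]) <+: p := by
            rcases List.prefix_or_prefix_of_prefix hp hacc' with h2 | h2
            · exact (h2.eq_of_length (le_antisymm h2.length_le (by simp [Nat.succ_le_of_lt (Nat.lt_of_not_le hpl)]))) ▸ List.prefix_refl _
            · exact h2
          have h3 : (acc ++ [c]) <+: f.toList := h2.trans (hc f hf)
          have h4 : f.toList.take (acc ++ [c]).length = acc ++ [c] := (List.prefix_iff_eq_take.1 h3).symm
          rw [show (acc ++ [c]).length = i + 1 by simp [hlen]] at h4
          exact hfne' h4

-- core equality: A's loop result = lcp2 of the sorted extremes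
lemma core_eq (fl : List String) (hne : fl ≠ []) :
    aLoopA fl 0 (PySem.List.pyGetD fl 0 "").toList [] =
    lcp2 (PySem.List.pyGetD (PySem.List.sorted fl (fun s => s) false) 0 "").toList
         (PySem.List.pyGetD (PySem.List.sorted fl (fun s => s) false) (-1) "").toList := by
  -- names
  have hs0mem : PySem.List.pyGetD fl 0 "" ∈ fl := by
    cases fl with
    | nil => exact absurd rfl hne
    | cons f0 tl => simp [PySem.List.pyGetD_zero_cons]
  set s0 := PySem.List.pyGetD fl 0 "" with hs0
  set l := PySem.List.sorted fl (fun s => s) false with hl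
  have hperm : l.Perm fl := PySem.List.sorted_perm fl _ _
  have hlne : l ≠ [] := by
    intro h; exact hne ((h ▸ hperm).symm.eq_nil)
  obtain ⟨m, t, hmt⟩ := List.exists_cons_of_ne_nil hlne
  have hfirst : PySem.List.pyGetD l 0 "" = m := by rw [hmt, PySem.List.pyGetD_zero_cons]
  have hlast : PySem.List.pyGetD l (-1) "" = l.getLast hlne := PySem.List.pyGetD_neg_one l "" hlne
  set first := PySem.List.pyGetD l 0 "" with hfi
  set last := PySem.List.pyGetD l (-1) "" with hla
  have hfmem : first ∈ fl := hperm.mem_iff.1 (by rw [hfirst, hmt]; exact List.mem_cons_self ..)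
  have hlmem : last ∈ fl := hperm.mem_iff.1 (by rw [hlast]; exact List.getLast_mem hlne)
  -- first is minimal, last maximal
  have hmin : ∀ y ∈ fl, first ≤ y := by
    rw [hfirst]
    intro y hy
    exact PySem.List.key_head_sorted_le fl (fun s => s) hmt y hy
  have hmax : ∀ y ∈ fl, y ≤ last := by
    intro y hy
    rw [hlast]
    exact pairwise_le_getLast l y (PySem.List.sorted_pairwise fl (fun s => s)) (hperm.mem_iff.2 hy) hlne
  -- A side properties
  obtain ⟨r1, r2, r3⟩ := aLoopA_props fl s0.toList 0 [] rfl (fun f _ => List.nil_prefix)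
  simp only [List.nil_append] at r2 r3
  set R := aLoopA fl 0 s0.toList [] with hR
  set L := lcp2 first.toList last.toList with hL
  -- L is a common prefix of every file (betweenness)
  have hLcomm : ∀ f ∈ fl, L <+: f.toList := by
    intro f hf
    exact between_prefix L first.toList f.toList last.toList
      (String.le_iff_toList_le.1 (hmin f hf)) (String.le_iff_toList_le.1 (hmax f hf))
      (lcp2_prefix_left _ _) (lcp2_prefix_right _ _)
  have h1 : R <+: L := lcp2_maximal R first.toList last.toList (r1 first hfmem) (r1 last hlmem)
  have h2 : L <+: R := r3 L (hLcomm s0 hs0mem) hLcomm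
  exact h1.eq_of_length (le_antisymm h1.length_le h2.length_le)

-- ===== VERDICT =====
theorem get_left_same_part_spec : Claim_equal_get_left_same_part := by
  intro fl _ hpre
  unfold Spec_get_left_same_part get_left_same_part get_left_same_part_alt
  by_cases h1 : fl.length = 1
  · simp [h1]
  · have hb : (fl.length == 1) = false := beq_eq_false_iff_ne.2 h1
    simp only [hb, Bool.false_eq_true, if_false]
    rw [core_eq fl hpre]
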